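-- pv_equiv track=rewrite | github.com/DPFNeiland/Python-Environment | 2semestre/Martech/Binarios/vinho.py | descobrir
-- ===== SOURCE A (Python) =====
-- def descobrir(n, garrafa_envenenada):
--     k = n.bit_length()
--     testadores = [0] * k
--
--     for i in range(k):
--         if garrafa_envenenada & (1 << i) != 0:
--             testadores[i] = 1
--
--     # converter
--     resp = 0
--     for i in range(k):
--         if testadores[i] == 1:
--             resp |= (1 << i)
--
--     return resp
-- ===== SOURCE B (Python) =====
-- def descobrir(n, garrafa_envenenada):
--     # closed form: keep the low n.bit_length() bits of garrafa_envenenada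
--     return garrafa_envenenada & ((1 << n.bit_length()) - 1)
-- ===== Notes on version B (the rewrite author's own statement) =====
-- stated objective: simpler
-- what changed: replaces the per-bit decompose-into-a-list-and-recompose double loop with a single closed-form bit mask garrafa & ((1 << n.bit_length()) - 1)
import Mathlib
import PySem

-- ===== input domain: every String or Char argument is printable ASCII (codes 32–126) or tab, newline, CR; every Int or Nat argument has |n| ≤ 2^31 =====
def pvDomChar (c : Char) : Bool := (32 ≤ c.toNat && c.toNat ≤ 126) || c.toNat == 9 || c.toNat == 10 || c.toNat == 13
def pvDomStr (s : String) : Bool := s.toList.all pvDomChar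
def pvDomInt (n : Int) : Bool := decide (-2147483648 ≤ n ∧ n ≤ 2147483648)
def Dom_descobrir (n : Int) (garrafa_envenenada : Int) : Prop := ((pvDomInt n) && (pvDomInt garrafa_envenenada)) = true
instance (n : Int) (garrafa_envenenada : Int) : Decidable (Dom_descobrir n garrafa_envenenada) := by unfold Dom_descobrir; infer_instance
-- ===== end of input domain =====

-- B replaces A's decompose-into-a-bit-list-and-recompose double loop by the single
-- closed-form mask garrafa & ((1 << n.bit_length()) - 1); return values proved equal on all inputs.

-- ===== PORT A =====
-- loop indices of range(k) are always in bounds of testadores (length k), so the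
-- Python index testadores[i] is ported exactly as getD i 0
def descobrir (n : Int) (garrafa_envenenada : Int) : Int :=
  let k := PySem.Int.bitLength n
  let testadores : List Int :=
    (List.range k).foldl
      (fun (t : List Int) (i : Nat) => if PySem.Int.band garrafa_envenenada ((1 : Int) <<< i) ≠ 0 then t.set i 1 else t)
      (List.replicate k 0)
  (List.range k).foldl
    (fun (resp : Int) (i : Nat) => if testadores.getD i 0 = 1 then PySem.Int.bor resp ((1 : Int) <<< i) else resp)
    0

-- ===== PORT B =====
def descobrir_alt (n : Int) (garrafa_envenenada : Int) : Int :=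
  PySem.Int.band garrafa_envenenada (((1 : Int) <<< PySem.Int.bitLength n) - 1)

-- ===== PRECONDITION & SPEC =====
def Spec_descobrir (n : Int) (garrafa_envenenada : Int) (out : Int) : Prop := out = descobrir_alt n garrafa_envenenada
instance (n : Int) (garrafa_envenenada : Int) (out : Int) : Decidable (Spec_descobrir n garrafa_envenenada out) := by unfold Spec_descobrir; infer_instance

-- ===== CLAIM (what is proved, stated in full; the proofs are below) =====
def Claim_equal_descobrir : Prop := ∀ (n : Int) (garrafa_envenenada : Int), Dom_descobrir n garrafa_envenenada → Spec_descobrir n garrafa_envenenada (descobrir n garrafa_envenenada)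

-- ===== LEMMAS AND PROOFS =====

-- (1:Int) <<< i = 2^i
theorem pv_one_shl (i : Nat) : (1 : Int) <<< i = 2 ^ i := by
  simp [Int.shiftLeft_eq]

-- the "bit i of g" of Python's infinite two's complement, split by sign
def pvBit (g : Int) (i : Nat) : Bool :=
  if 0 ≤ g then g.toNat.testBit i else !((-g - 1).toNat.testBit i)

-- a Nat or with a fresh power of two is addition
theorem pv_or_two_pow (a k : Nat) (h : a < 2 ^ k) : a ||| 2 ^ k = a + 2 ^ k := by
  apply Nat.eq_of_testBit_eq
  intro i
  rcases lt_trichotomy i k with hi | rfl | hi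
  · rw [Nat.add_comm, Nat.testBit_two_pow_add_gt hi, Nat.testBit_lor,
      Nat.testBit_two_pow_of_ne (Nat.ne_of_gt hi)]
    simp
  · rw [Nat.add_comm, Nat.testBit_two_pow_add_eq, Nat.testBit_lt_two_pow h]
    simp [Nat.testBit_lt_two_pow h]
  · have h2 : a + 2 ^ k < 2 ^ i := by
      have : 2 ^ (k + 1) ≤ 2 ^ i := Nat.pow_le_pow_right (by norm_num) hi
      have := Nat.pow_succ 2 k
      omega
    rw [Nat.testBit_lt_two_pow h2, Nat.testBit_lor,
      Nat.testBit_two_pow_of_ne (Nat.ne_of_lt hi)]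
    have : a < 2 ^ i := by omega
    simp [Nat.testBit_lt_two_pow this]

-- band with a power of two reads exactly one bit
theorem pv_band_two_pow (g : Int) (i : Nat) :
    PySem.Int.band g (2 ^ i) = (pvBit g i).toNat * 2 ^ i := by
  unfold PySem.Int.band pvBit
  have hp : (0:Int) ≤ 2 ^ i := by positivity
  have hpn : ((2:Int) ^ i).toNat = 2 ^ i := by
    rw [show ((2:Int) ^ i) = ((2 ^ i : Nat) : Int) by push_cast; ring, Int.toNat_natCast]
  by_cases hg : 0 ≤ g
  · simp only [if_pos hg, if_pos hp, hpn, Nat.and_two_pow]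
    push_cast
    ring
  · simp only [if_neg hg, if_pos hp, hpn]
    rw [Nat.two_pow_and]
    set t := (-g - 1).toNat with ht
    have h1 : (1:Nat) ≤ 2 ^ i := Nat.one_le_two_pow
    cases h : t.testBit i <;> simp

-- quotient/remainder characterisation of Int emod
theorem pv_emod_char (g r q p : Int) (h : g = r + p * q) (h0 : 0 ≤ r) (h1 : r < p) :
    g % p = r := by
  subst h
  rw [Int.add_mul_emod_self_left, Int.emod_eq_of_lt h0 h1]

theorem pv_emod_nonneg (g : Int) (k : Nat) (hg : 0 ≤ g) :
    g % (2 ^ k) = ((g.toNat % 2 ^ k : Nat) : Int) := by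
  have hcast : ((2:Int) ^ k) = ((2 ^ k : Nat) : Int) := by push_cast; ring
  rw [hcast]
  have hm : g.toNat % 2 ^ k < 2 ^ k := Nat.mod_lt _ (by positivity)
  have hd : ((g.toNat % 2 ^ k : Nat) : Int) + ((2 ^ k : Nat) : Int) * ((g.toNat / 2 ^ k : Nat) : Int) = (g.toNat : Int) := by
    exact_mod_cast Nat.mod_add_div g.toNat (2 ^ k)
  apply pv_emod_char _ _ ((g.toNat / 2 ^ k : Nat) : Int) <;> omega

theorem pv_emod_neg (g : Int) (k : Nat) (hg : g < 0) :
    g % (2 ^ k) = 2 ^ k - 1 - (((-g - 1).toNat % 2 ^ k : Nat) : Int) := by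
  have hcast : ((2:Int) ^ k) = ((2 ^ k : Nat) : Int) := by push_cast; ring
  rw [hcast]
  have hm : (-g - 1).toNat % 2 ^ k < 2 ^ k := Nat.mod_lt _ (by positivity)
  have hd : (((-g - 1).toNat % 2 ^ k : Nat) : Int) + ((2 ^ k : Nat) : Int) * (((-g - 1).toNat / 2 ^ k : Nat) : Int) = ((-g - 1).toNat : Int) := by
    exact_mod_cast Nat.mod_add_div (-g - 1).toNat (2 ^ k)
  apply pv_emod_char _ _ (-(((-g - 1).toNat / 2 ^ k : Nat) : Int) - 1) <;> [ (ring_nf; ring_nf at hd; omega); omega; omega ]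

-- band with a low mask is Python's mod 2^k, i.e. Lean's emod
theorem pv_band_mask (g : Int) (k : Nat) :
    PySem.Int.band g (2 ^ k - 1) = g % (2 ^ k) := by
  unfold PySem.Int.band
  have h1 : (1:Nat) ≤ 2 ^ k := Nat.one_le_two_pow
  have hp : (0:Int) ≤ 2 ^ k - 1 := by
    have : ((2:Int))^k ≥ 1 := one_le_pow₀ (by norm_num)
    omega
  have hpn : ((2:Int) ^ k - 1).toNat = 2 ^ k - 1 := by
    rw [show ((2:Int) ^ k - 1) = ((2 ^ k - 1 : Nat) : Int) by push_cast [h1]; ring, Int.toNat_natCast]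
  by_cases hg : 0 ≤ g
  · rw [if_pos hg, if_pos hp, hpn, Nat.and_two_pow_sub_one_eq_mod, pv_emod_nonneg g k hg]
  · rw [if_neg hg, if_pos hp, hpn, Nat.land_comm, Nat.and_two_pow_sub_one_eq_mod,
      pv_emod_neg g k (by omega)]
    have hm : (-g - 1).toNat % 2 ^ k < 2 ^ k := Nat.mod_lt _ (by positivity)
    have hcast : ((2:Int) ^ k) = ((2 ^ k : Nat) : Int) := by push_cast; ring
    rw [hcast]
    omega

-- emod step: the next bit is added going from 2^k to 2^(k+1)
theorem pv_emod_succ (g : Int) (k : Nat) :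
    g % (2 ^ (k + 1)) = g % (2 ^ k) + (pvBit g k).toNat * 2 ^ k := by
  unfold pvBit
  by_cases hg : 0 ≤ g
  · rw [if_pos hg, pv_emod_nonneg g _ hg, pv_emod_nonneg g _ hg]
    have hms := @Nat.mod_pow_succ g.toNat 2 k
    have hbit : g.toNat.testBit k = decide (g.toNat / 2 ^ k % 2 = 1) := Nat.testBit_eq_decide_div_mod_eq
    have h2 : g.toNat / 2 ^ k % 2 < 2 := Nat.mod_lt _ (by norm_num)
    have hcast : ((2:Int) ^ k) = ((2 ^ k : Nat) : Int) := by push_cast; ring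
    rw [hcast]
    cases h : decide (g.toNat / 2 ^ k % 2 = 1) <;> rw [h] at hbit <;> rw [hbit] <;>
      simp only [Bool.toNat_true, Bool.toNat_false] <;>
      simp only [decide_eq_true_eq, decide_eq_false_iff_not] at h
    · have h0 : g.toNat / 2 ^ k % 2 = 0 := by omega
      rw [h0] at hms
      omega
    · rw [h] at hms
      omega
  · rw [if_neg hg, pv_emod_neg g _ (by omega), pv_emod_neg g _ (by omega)]
    set t := (-g - 1).toNat with ht
    have hms := @Nat.mod_pow_succ t 2 k
    have hbit : t.testBit k = decide (t / 2 ^ k % 2 = 1) := Nat.testBit_eq_decide_div_mod_eq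
    have h2 : t / 2 ^ k % 2 < 2 := Nat.mod_lt _ (by norm_num)
    have hcast : ((2:Int) ^ k) = ((2 ^ k : Nat) : Int) := by push_cast; ring
    have hcast1 : ((2:Int) ^ (k+1)) = ((2 ^ (k+1) : Nat) : Int) := by push_cast; ring
    have hpow : (2:Nat) ^ (k+1) = 2 ^ k * 2 := by ring
    rw [hcast, hcast1]
    cases h : decide (t / 2 ^ k % 2 = 1) <;> rw [h] at hbit <;> rw [hbit] <;>
      simp only [Bool.toNat_true, Bool.toNat_false, Bool.not_true, Bool.not_false] <;>
      simp only [decide_eq_true_eq, decide_eq_false_iff_not] at h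
    · have h0 : t / 2 ^ k % 2 = 0 := by omega
      rw [h0] at hms
      omega
    · rw [h] at hms
      omega

-- bor of the residue below 2^k with 2^k itself is addition
theorem pv_bor_step (g : Int) (k : Nat) :
    PySem.Int.bor (g % (2 ^ k)) (2 ^ k) = g % (2 ^ k) + 2 ^ k := by
  have hp : (0:Int) < 2 ^ k := by positivity
  have h0 : 0 ≤ g % (2 ^ k) := Int.emod_nonneg g (by positivity)
  have h1 : g % (2 ^ k) < 2 ^ k := Int.emod_lt_of_pos g hp
  rw [PySem.Int.bor_of_nonneg h0 (le_of_lt hp)]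
  have hpn : ((2:Int) ^ k).toNat = 2 ^ k := by
    rw [show ((2:Int) ^ k) = ((2 ^ k : Nat) : Int) by push_cast; ring, Int.toNat_natCast]
  rw [hpn, pv_or_two_pow _ _ (by omega)]
  push_cast
  omega

-- loop 1 preserves the list length
theorem pv_loop1_length (g : Int) (l : List Nat) (t : List Int) :
    (l.foldl (fun (t : List Int) (i : Nat) => if PySem.Int.band g ((1 : Int) <<< i) ≠ 0 then t.set i 1 else t) t).length = t.length := by
  induction l generalizing t with
  | nil => rfl
  | cons x xs ih =>
      simp only [List.foldl_cons]
      rw [ih]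
      split <;> simp

-- loop 1 characterised entrywise
theorem pv_loop1_getD (g : Int) (m : Nat) (t : List Int) (hm : m ≤ t.length) (i : Nat) :
    ((List.range m).foldl (fun (t : List Int) (i : Nat) => if PySem.Int.band g ((1 : Int) <<< i) ≠ 0 then t.set i 1 else t) t).getD i 0
      = if i < m ∧ PySem.Int.band g ((1 : Int) <<< i) ≠ 0 then 1 else t.getD i 0 := by
  induction m with
  | zero => simp
  | succ m ih =>
      rw [List.range_succ, List.foldl_append]
      have hlen := pv_loop1_length g (List.range m) t
      have hm' : m ≤ t.length := by omega
      simp only [List.foldl_cons, List.foldl_nil]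
      by_cases hc : PySem.Int.band g ((1 : Int) <<< m) ≠ 0
      · rw [if_pos hc, List.getD_eq_getElem?_getD, List.getElem?_set, hlen]
        by_cases him : m = i
        · subst him
          rw [if_pos rfl, if_pos (by omega), if_pos ⟨by omega, hc⟩]
          rfl
        · rw [if_neg him, ← List.getD_eq_getElem?_getD, ih hm']
          by_cases hcnd : PySem.Int.band g ((1 : Int) <<< i) ≠ 0
          · by_cases hi : i < m
            · rw [if_pos ⟨hi, hcnd⟩, if_pos ⟨by omega, hcnd⟩]
            · rw [if_neg (fun h => hi h.1), if_neg (fun h => (by omega : ¬ i < m + 1) h.1)]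
          · rw [if_neg (fun h => hcnd h.2), if_neg (fun h => hcnd h.2)]
      · rw [if_neg hc, ih hm']
        by_cases hcnd : PySem.Int.band g ((1 : Int) <<< i) ≠ 0
        · have him : i ≠ m := fun e => hc (e ▸ hcnd)
          by_cases hi : i < m
          · rw [if_pos ⟨hi, hcnd⟩, if_pos ⟨by omega, hcnd⟩]
          · rw [if_neg (fun h => hi h.1), if_neg (fun h => (by omega : ¬ i < m + 1) h.1)]
        · rw [if_neg (fun h => hcnd h.2), if_neg (fun h => hcnd h.2)]

-- loop 2 in condition form computes the residue
theorem pv_loop2 (g : Int) (k : Nat) :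
    (List.range k).foldl
      (fun (r : Int) (i : Nat) => if PySem.Int.band g ((1 : Int) <<< i) ≠ 0 then PySem.Int.bor r ((1 : Int) <<< i) else r) 0
      = g % (2 ^ k) := by
  induction k with
  | zero => simp
  | succ k ih =>
      rw [List.range_succ, List.foldl_append]
      simp only [List.foldl_cons, List.foldl_nil]
      rw [ih, pv_one_shl, pv_band_two_pow, pv_emod_succ]
      have hp : (0:Int) < 2 ^ k := by positivity
      cases h : pvBit g k
      · simp
      · simp only [Bool.toNat_true]
        rw [if_pos (by simp), pv_bor_step]
        push_cast
        ring

-- ===== VERDICT (by name: the statement is the Claim_ definition above) =====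
theorem descobrir_spec : Claim_equal_descobrir := by
  intro n g _
  unfold Spec_descobrir descobrir descobrir_alt
  rw [pv_one_shl, pv_band_mask]
  set k := PySem.Int.bitLength n with hk
  rw [PySem.List.foldl_congr_mem (List.range k) _
    (fun (r : Int) (i : Nat) => if PySem.Int.band g ((1 : Int) <<< i) ≠ 0 then PySem.Int.bor r ((1 : Int) <<< i) else r) 0 ?_,
    pv_loop2]
  intro acc i hi
  have hik : i < k := List.mem_range.mp hi
  rw [pv_loop1_getD g k (List.replicate k 0) (by simp) i, List.getD_replicate _ hik]
  by_cases hcnd : PySem.Int.band g ((1 : Int) <<< i) ≠ 0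
  · have h1 : (if i < k ∧ PySem.Int.band g ((1 : Int) <<< i) ≠ 0 then (1:Int) else 0) = 1 := if_pos ⟨hik, hcnd⟩
    rw [if_pos h1]
    simp [hcnd]
  · have h1 : ¬ ((if i < k ∧ PySem.Int.band g ((1 : Int) <<< i) ≠ 0 then (1:Int) else 0) = 1) := by
      rw [if_neg (fun h => hcnd h.2)]
      norm_num
    rw [if_neg h1]
    simp [hcnd]
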